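-- pv_equiv track=rewrite | github.com/nadimra/competitive-programming | other/maxAggTempChange.py | maxAggTempChangeOptimal
-- ===== SOURCE A (Python) =====
-- def maxAggTempChangeOptimal(a):
--     preSumLeft = []
--     preSumRight = []
--
--     countLeft = 0
--     for i in range(0,len(a)):
--         countLeft += a[i]
--         preSumLeft.append(countLeft)
--
--     countRight = 0
--     for i in range(len(a)-1, -1, -1):
--         countRight += a[i]
--         preSumRight.append(countRight)
--
--     currentMaxAgg = 0
--     for i in range(0,len(a)):
--         left = preSumLeft[i]
--         right = preSumRight[len(a)-1-i]
--         current = max(left,right)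
--         currentMaxAgg = max(currentMaxAgg,current)
--     return currentMaxAgg
-- ===== SOURCE B (Python) =====
-- def maxAggTempChangeOptimal(a):
--     # One forward pass, no reversal: the best suffix sum equals
--     # total - (minimum prefix sum over prefixes of length 0..n-1),
--     # so track total, best prefix sum, and that minimum in a single scan.
--     total = 0
--     best = 0
--     minPrefix = 0
--     for x in a:
--         if total < minPrefix:
--             minPrefix = total
--         total += x
--         if total > best:
--             best = total
--     return max(best, total - minPrefix)
-- ===== Notes on version B (the rewrite author's own statement) =====
-- stated objective: alternative
-- what changed: B is a single forward pass with no reversal and no stored arrays: it tracks the running total, the best prefix sum, and the minimum prefix sum over proper prefixes, and recovers the best suffix sum as total minus that minimum (suffix(i) = total - prefix(i)), replacing A's three loops over two parallel arrays.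
import Mathlib
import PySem

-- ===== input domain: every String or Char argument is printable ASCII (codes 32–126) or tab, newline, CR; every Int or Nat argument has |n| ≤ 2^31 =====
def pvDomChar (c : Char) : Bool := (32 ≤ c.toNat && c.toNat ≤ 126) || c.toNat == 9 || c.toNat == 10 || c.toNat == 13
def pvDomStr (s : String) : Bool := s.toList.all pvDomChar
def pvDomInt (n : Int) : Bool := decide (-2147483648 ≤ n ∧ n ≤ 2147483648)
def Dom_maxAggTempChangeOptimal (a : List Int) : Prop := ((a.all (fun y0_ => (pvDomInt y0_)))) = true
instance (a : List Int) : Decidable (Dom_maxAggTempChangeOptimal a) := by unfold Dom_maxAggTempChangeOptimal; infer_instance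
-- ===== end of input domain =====

-- B is one forward pass with no reversal and no arrays: it tracks the running total,
-- the best prefix sum, and the minimum prefix sum over proper prefixes, and recovers
-- the best suffix sum as total minus that minimum (objective: alternative).

-- ===== PORT A =====
def maxAggTempChangeOptimal (a : List Int) : Int :=
  let n : Int := a.length
  -- first loop: for i in range(0, len(a)): countLeft += a[i]; preSumLeft.append(countLeft)
  let stL := (PySem.List.pyRange 0 n 1).foldl
      (fun (st : List Int × Int) i =>
        let c := st.2 + PySem.List.pyGetD a i 0
        (st.1 ++ [c], c)) ([], 0)
  let preSumLeft := stL.1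
  -- second loop: for i in range(len(a)-1, -1, -1): countRight += a[i]; preSumRight.append(countRight)
  let stR := (PySem.List.pyRange (n - 1) (-1) (-1)).foldl
      (fun (st : List Int × Int) i =>
        let c := st.2 + PySem.List.pyGetD a i 0
        (st.1 ++ [c], c)) ([], 0)
  let preSumRight := stR.1
  -- third loop: currentMaxAgg = max(currentMaxAgg, max(preSumLeft[i], preSumRight[len(a)-1-i]))
  (PySem.List.pyRange 0 n 1).foldl
      (fun cur i =>
        max cur (max (PySem.List.pyGetD preSumLeft i 0)
                     (PySem.List.pyGetD preSumRight (n - 1 - i) 0))) 0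

-- ===== PORT B =====
-- single pass: state (total, best, minPrefix), updated exactly as in Source B
def maxAggTempChangeOptimal_alt (a : List Int) : Int :=
  let st := a.foldl
      (fun (st : Int × Int × Int) x =>
        let minPrefix := if st.1 < st.2.2 then st.1 else st.2.2
        let total := st.1 + x
        let best := if total > st.2.1 then total else st.2.1
        (total, best, minPrefix)) (0, 0, 0)
  max st.2.1 (st.1 - st.2.2)

-- ===== PRECONDITION & SPEC =====
def Spec_maxAggTempChangeOptimal (a : List Int) (out : Int) : Prop := out = maxAggTempChangeOptimal_alt a
instance (a : List Int) (out : Int) : Decidable (Spec_maxAggTempChangeOptimal a out) := by unfold Spec_maxAggTempChangeOptimal; infer_instance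

-- ===== CLAIM (what is proved, stated in full; the proofs are below) =====
def Claim_equal_maxAggTempChangeOptimal : Prop := ∀ (a : List Int), Dom_maxAggTempChangeOptimal a → Spec_maxAggTempChangeOptimal a (maxAggTempChangeOptimal a)

-- ===== LEMMAS AND PROOFS =====

-- running sums of a list (prefix sums of nonempty prefixes), used only by the proofs
def runningSums (t : Int) : List Int → List Int
  | [] => []
  | x :: xs => (t + x) :: runningSums (t + x) xs

-- prefix sums of proper prefixes (lengths 0..n-1): the values B's minPrefix sees
def prefExcl (t : Int) : List Int → List Int
  | [] => []
  | x :: xs => t :: prefExcl (t + x) xs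

-- A's append-loop state equals (acc ++ running sums, final count)
theorem scan_state (xs : List Int) : ∀ (acc : List Int) (t : Int),
    xs.foldl (fun (st : List Int × Int) x => (st.1 ++ [st.2 + x], st.2 + x)) (acc, t)
      = (acc ++ runningSums t xs, t + xs.sum) := by
  induction xs with
  | nil => intro acc t; simp [runningSums]
  | cons x xs ih =>
      intro acc t
      simp only [List.foldl_cons, ih, runningSums, List.sum_cons]
      rw [Prod.mk.injEq]
      exact ⟨by simp, by ring⟩

theorem length_runningSums (xs : List Int) : ∀ t, (runningSums t xs).length = xs.length := by
  induction xs with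
  | nil => intro t; simp [runningSums]
  | cons x xs ih => intro t; simp [runningSums, ih]

-- pull a max out of a foldl max seed
theorem foldl_max_pull (l : List Int) : ∀ c d : Int,
    l.foldl max (max c d) = max c (l.foldl max d) := by
  induction l with
  | nil => intro c d; rfl
  | cons x l ih =>
      intro c d
      simp only [List.foldl_cons]
      rw [show max (max c d) x = max c (max d x) by omega, ih]

theorem foldl_min_pull (l : List Int) : ∀ c d : Int,
    l.foldl min (min c d) = min c (l.foldl min d) := by
  induction l with
  | nil => intro c d; rfl
  | cons x l ih =>
      intro c d
      simp only [List.foldl_cons]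
      rw [show min (min c d) x = min c (min d x) by omega, ih]

theorem foldr_max_eq_foldl_max (l : List Int) : ∀ c : Int,
    l.foldr max c = l.foldl max c := by
  induction l with
  | nil => intro c; rfl
  | cons x l ih =>
      intro c
      simp only [List.foldr_cons, List.foldl_cons, ih]
      rw [show max c x = max x c by omega, foldl_max_pull]

theorem le_foldl_max_init (l : List Int) : ∀ c : Int, c ≤ l.foldl max c := by
  induction l with
  | nil => intro c; exact le_refl c
  | cons x l ih =>
      intro c
      exact le_trans (le_max_left c x) (ih (max c x))

theorem foldl_max_append (L R : List Int) :
    (L ++ R).foldl max 0 = max (L.foldl max 0) (R.foldl max 0) := by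
  rw [List.foldl_append]
  have h0 : (0 : Int) ≤ L.foldl max 0 := le_foldl_max_init L 0
  calc R.foldl max (L.foldl max 0)
      = R.foldl max (max (L.foldl max 0) 0) := by rw [max_eq_left h0]
    _ = max (L.foldl max 0) (R.foldl max 0) := foldl_max_pull R _ 0

theorem foldl_max_reverse (l : List Int) : l.reverse.foldl max 0 = l.foldl max 0 := by
  rw [List.foldl_reverse]
  have : (fun (x b : Int) => max b x) = max := by
    funext x b; omega
  rw [this, foldr_max_eq_foldl_max]

theorem foldr_max_zipWith (L : List Int) : ∀ (M : List Int), L.length = M.length →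
    (List.zipWith max L M).foldr max 0 = max (L.foldr max 0) (M.foldr max 0) := by
  induction L with
  | nil =>
      intro M h
      have : M = [] := List.eq_nil_of_length_eq_zero h.symm
      subst this; simp
  | cons x L ih =>
      intro M h
      cases M with
      | nil => simp at h
      | cons y M =>
          simp only [List.zipWith_cons_cons, List.foldr_cons]
          rw [ih M (by simpa using h)]
          omega

-- A computes the max of 0 with all prefix running sums and all suffix running sums
theorem A_char (a : List Int) :
    maxAggTempChangeOptimal a
      = (runningSums 0 a ++ runningSums 0 a.reverse).foldl max 0 := by
  unfold maxAggTempChangeOptimal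
  set n : Int := (a.length : Int) with hn
  set L := runningSums 0 a with hL
  set R := runningSums 0 a.reverse with hR
  have hLlen : L.length = a.length := length_runningSums a 0
  have hRlen : R.length = a.length := by
    rw [hR, length_runningSums, List.length_reverse]
  -- first loop produces L
  have h1 : (PySem.List.pyRange 0 n 1).foldl
      (fun (st : List Int × Int) i => (st.1 ++ [st.2 + PySem.List.pyGetD a i 0], st.2 + PySem.List.pyGetD a i 0)) ([], 0)
      = ([] ++ L, 0 + a.sum) := by
    rw [hn, PySem.List.foldl_pyRange_zero_pyGetD' a 0
      (fun (st : List Int × Int) x => (st.1 ++ [st.2 + x], st.2 + x)) ([], 0)]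
    exact scan_state a [] 0
  -- second loop produces R
  have hrev : PySem.List.pyRange (n - 1) (-1) (-1) = (PySem.List.pyRange 0 n 1).reverse := by
    rw [PySem.List.pyRange_neg_one_eq_reverse]
    norm_num
  have h2 : (PySem.List.pyRange (n - 1) (-1) (-1)).foldl
      (fun (st : List Int × Int) i => (st.1 ++ [st.2 + PySem.List.pyGetD a i 0], st.2 + PySem.List.pyGetD a i 0)) ([], 0)
      = ([] ++ R, 0 + a.reverse.sum) := by
    rw [hrev]
    have hm : ((PySem.List.pyRange 0 n 1).reverse).foldl
        (fun (st : List Int × Int) i => (st.1 ++ [st.2 + PySem.List.pyGetD a i 0], st.2 + PySem.List.pyGetD a i 0)) ([], 0)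
        = (((PySem.List.pyRange 0 n 1).map (fun i => PySem.List.pyGetD a i 0)).reverse).foldl
        (fun (st : List Int × Int) x => (st.1 ++ [st.2 + x], st.2 + x)) ([], 0) := by
      rw [← List.map_reverse, List.foldl_map]
    rw [hm, hn, PySem.List.map_pyGetD_pyRange_zero']
    exact scan_state a.reverse [] 0
  simp only [h1, h2, List.nil_append]
  -- third loop: each step reads (zipWith max L R.reverse)[i]
  have hzlen : (List.zipWith max L R.reverse).length = a.length := by
    simp [hLlen, hRlen]
  have h3 : (PySem.List.pyRange 0 n 1).foldl
      (fun cur i => max cur (max (PySem.List.pyGetD L i 0) (PySem.List.pyGetD R (n - 1 - i) 0))) 0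
      = (PySem.List.pyRange 0 n 1).foldl
      (fun cur i => max cur (PySem.List.pyGetD (List.zipWith max L R.reverse) i 0)) 0 := by
    apply PySem.List.foldl_congr_mem
    intro cur i hi
    rw [PySem.List.mem_pyRange_one] at hi
    obtain ⟨hi0, hi1⟩ := hi
    have hiL : i < (L.length : Int) := by omega
    have hiR : n - 1 - i < (R.length : Int) := by omega
    have hiR0 : (0 : Int) ≤ n - 1 - i := by omega
    have hiZ : i < ((List.zipWith max L R.reverse).length : Int) := by
      rw [hzlen]; omega
    rw [PySem.List.pyGetD_eq_getElem L 0 hi0 hiL,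
        PySem.List.pyGetD_eq_getElem R 0 hiR0 hiR,
        PySem.List.pyGetD_eq_getElem _ 0 hi0 hiZ]
    have hidx : (n - 1 - i).toNat = R.length - 1 - i.toNat := by omega
    have hgz : (List.zipWith max L R.reverse)[i.toNat]'(by omega)
        = max (L[i.toNat]'(by omega)) (R.reverse[i.toNat]'(by simp [hRlen]; omega)) := by
      exact List.getElem_zipWith
    rw [hgz, List.getElem_reverse]
    simp only [hidx]
  rw [h3, hn, show (a.length : Int) = ((List.zipWith max L R.reverse).length : Int) by rw [hzlen],
      PySem.List.foldl_pyRange_zero_pyGetD' (List.zipWith max L R.reverse) 0 max 0]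
  rw [← foldr_max_eq_foldl_max, foldr_max_zipWith L R.reverse (by simp [hLlen, hRlen]),
      foldr_max_eq_foldl_max, foldr_max_eq_foldl_max, foldl_max_reverse, ← foldl_max_append]

-- B's single-pass state = (running total, max of running sums, min over proper-prefix sums)
theorem alt_fold (xs : List Int) : ∀ (t b m : Int),
    xs.foldl (fun (st : Int × Int × Int) x =>
        let minPrefix := if st.1 < st.2.2 then st.1 else st.2.2
        let total := st.1 + x
        let best := if total > st.2.1 then total else st.2.1
        (total, best, minPrefix)) (t, b, m)
      = (t + xs.sum, (runningSums t xs).foldl max b, (prefExcl t xs).foldl min m) := by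
  induction xs with
  | nil => intro t b m; simp [runningSums, prefExcl]
  | cons x xs ih =>
      intro t b m
      simp only [List.foldl_cons, runningSums, prefExcl, List.sum_cons]
      rw [show (if t + x > b then t + x else b) = max b (t + x) by omega,
          show (if t < m then t else m) = min m t by omega]
      rw [ih (t + x) (max b (t + x)) (min m t),
          show t + x + xs.sum = t + (x + xs.sum) by ring]

-- appending one element to the list appends its total-so-far to the proper-prefix sums
theorem prefExcl_append (xs : List Int) : ∀ (t y : Int),
    prefExcl t (xs ++ [y]) = prefExcl t xs ++ [t + xs.sum] := by
  induction xs with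
  | nil => intro t y; simp [prefExcl]
  | cons x xs ih =>
      intro t y
      simp only [List.cons_append, prefExcl, List.sum_cons, ih]
      rw [show t + x + xs.sum = t + (x + xs.sum) by ring]

-- suffix running sums are total minus the proper-prefix sums, reversed
theorem runningSums_reverse (xs : List Int) : ∀ t : Int,
    runningSums t xs.reverse
      = ((prefExcl 0 xs).map (fun p => t + xs.sum - p)).reverse := by
  induction xs using List.reverseRecOn with
  | nil => intro t; simp [runningSums, prefExcl]
  | append_singleton xs y ih =>
      intro t
      rw [List.reverse_append]
      simp only [List.reverse_singleton, List.singleton_append, runningSums]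
      rw [ih (t + y), prefExcl_append xs 0 y, List.map_append, List.reverse_append]
      simp only [List.map_cons, List.map_nil, List.reverse_singleton, List.singleton_append,
        List.sum_append, List.sum_cons, List.sum_nil]
      rw [List.cons.injEq]
      constructor
      · ring
      · congr 1
        exact List.map_congr_left (fun p _ => by ring)

-- folding max over (S - ·) is S minus folding min
theorem foldl_max_map_sub (l : List Int) : ∀ (S c : Int),
    (l.map (fun p => S - p)).foldl max c = S - l.foldl min (S - c) := by
  induction l with
  | nil => intro S c; simp
  | cons p l ih =>
      intro S c
      simp only [List.map_cons, List.foldl_cons]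
      rw [ih S (max c (S - p)),
          show S - max c (S - p) = min (S - c) p by omega]

-- ===== VERDICT (by name: the statement is the Claim_ definition above) =====
theorem maxAggTempChangeOptimal_spec : Claim_equal_maxAggTempChangeOptimal := by
  intro a _
  unfold Spec_maxAggTempChangeOptimal
  rw [A_char]
  unfold maxAggTempChangeOptimal_alt
  rw [alt_fold a 0 0 0]
  cases a with
  | nil => simp [runningSums, prefExcl]
  | cons x xs =>
      simp only []
      rw [foldl_max_append, runningSums_reverse (x :: xs) 0]
      rw [foldl_max_reverse]
      have hf : ((fun p => (0 : Int) + (x :: xs).sum - p)) = (fun p => (x :: xs).sum - p) := by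
        funext p; ring
      rw [hf, foldl_max_map_sub]
      have hpe : prefExcl 0 (x :: xs) = 0 :: prefExcl x xs := by
        simp [prefExcl]
      rw [hpe]
      have e1 : ((0 : Int) :: prefExcl x xs).foldl min ((x :: xs).sum - 0)
          = min ((x :: xs).sum) ((prefExcl x xs).foldl min 0) := by
        rw [List.foldl_cons, show min ((x :: xs).sum - 0) 0 = min ((x :: xs).sum) 0 by omega,
            foldl_min_pull]
      have e2 : ((0 : Int) :: prefExcl x xs).foldl min 0
          = (prefExcl x xs).foldl min 0 := by
        rw [List.foldl_cons, show min (0 : Int) 0 = 0 by omega]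
      rw [e1, e2]
      have hge : (0 : Int) ≤ (runningSums 0 (x :: xs)).foldl max 0 := le_foldl_max_init _ 0
      omega
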